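-- pv_equiv track=rewrite | github.com/Nechaiter/CSES-DS-and-Algorithms-spring-2025 | Week 4/playlist.py | count_parts
-- ===== SOURCE A (Python) =====
-- def count_parts(songs):
--     n = len(songs)
--
--     pos = {}
--     start = 0
--     length = 0
--     count=0
--
--
--     for i, song in enumerate(songs):
--         if song in pos:
--             start = max(start, pos[song] + 1)
--
--         length = i - start + 1
--         count=count+length
--         pos[song] = i
--
--     if count==0:
--         count=int((n*(n+1))/2)
--     return count
-- ===== SOURCE B (Python) =====
-- def count_parts(songs):
--     total = 0
--     for i in range(len(songs)):
--         seen = set()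
--         j = i
--         while j >= 0 and songs[j] not in seen:
--             seen.add(songs[j])
--             j -= 1
--         total += i - j
--     return total
-- ===== Notes on version B (the rewrite author's own statement) =====
-- stated objective: simpler
-- what changed: Replaces the last-position dict with a max-jumped window start by an independent per-index backward scan: for each i it walks left collecting elements into a set until the first repeat, adding the distinct-suffix length; no dict, no carried window state.
import Mathlib
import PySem

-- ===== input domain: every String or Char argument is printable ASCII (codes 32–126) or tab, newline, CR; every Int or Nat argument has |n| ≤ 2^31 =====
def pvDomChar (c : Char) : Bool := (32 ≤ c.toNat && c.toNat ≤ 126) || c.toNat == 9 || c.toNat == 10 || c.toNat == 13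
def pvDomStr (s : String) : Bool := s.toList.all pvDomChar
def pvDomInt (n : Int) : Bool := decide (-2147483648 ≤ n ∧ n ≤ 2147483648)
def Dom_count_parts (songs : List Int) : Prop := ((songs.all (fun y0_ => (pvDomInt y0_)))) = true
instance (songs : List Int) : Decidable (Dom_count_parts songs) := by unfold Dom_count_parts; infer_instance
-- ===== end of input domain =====

-- B replaces A's carried last-position dict and max-jumped window start by an independent
-- per-index backward scan (simpler, no carried state); not faster: A is O(n), B is O(n^2).

-- ===== PORT A =====
-- the for-loop of A: state (pos, start, count), i the current enumerate index
def pvALoop (l : List Int) (i : Int) (pos : PySem.Dict Int Int) (start count : Int) : Int :=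
  match l with
  | [] => count
  | song :: rest =>
    let start' := match pos.get? song with
      | some p => max start (p + 1)
      | none => start
    let length := i - start' + 1
    pvALoop rest (i + 1) (pos.insert song i) start' (count + length)

def count_parts (songs : List Int) : Int :=
  let n : Int := songs.length
  let count := pvALoop songs 0 PySem.Dict.empty 0 0
  -- int((n*(n+1))/2): float true division then int; exact here since n*(n+1) is even
  -- and list lengths keep the product far below 2^53
  if count == 0 then PySem.Int.floordiv (n * (n + 1)) 2 else count

-- ===== PORT B =====
-- the inner while-loop of B: fuel k encodes the current index j = k - 1; returns the final j
def pvBScan (songs : List Int) (seen : PySem.Set Int) : Nat → Int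
  | 0 => -1
  | k + 1 =>
    -- songs[j]: index k is always in range at every call site (k + 1 ≤ songs.length), so pyGetD is exact
    let x := PySem.List.pyGetD songs (Int.ofNat k) 0
    if PySem.Set.contains seen x then Int.ofNat k
    else pvBScan songs (PySem.Set.add seen x) k

def count_parts_alt (songs : List Int) : Int :=
  (List.range songs.length).foldl
    (fun total i => total + ((Int.ofNat i) - pvBScan songs PySem.Set.empty (i + 1))) 0

-- ===== PRECONDITION & SPEC =====
def Spec_count_parts (songs : List Int) (out : Int) : Prop := out = count_parts_alt songs
instance (songs : List Int) (out : Int) : Decidable (Spec_count_parts songs out) := by unfold Spec_count_parts; infer_instance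

-- ===== CLAIM (what is proved, stated in full; the proofs are below) =====
def Claim_equal_count_parts : Prop := ∀ (songs : List Int), Dom_count_parts songs → Spec_count_parts songs (count_parts songs)

-- ===== LEMMAS AND PROOFS =====

-- length of the longest prefix of l whose elements are distinct and avoid seen
def pvDLen (seen : List Int) : List Int → Nat
  | [] => 0
  | x :: xs => if x ∈ seen then 0 else 1 + pvDLen (x :: seen) xs

-- first index of x in l (= l.length if absent)
def pvIdx (x : Int) (l : List Int) : Nat := l.findIdx (· == x)

-- the common specification: sum of distinct-suffix lengths, accumulated over the reversed prefix r
def pvG (r : List Int) : List Int → Int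
  | [] => 0
  | x :: xs => (pvDLen [] (x :: r) : Int) + pvG (x :: r) xs

theorem pvDLen_le (seen l : List Int) : pvDLen seen l ≤ l.length := by
  induction l generalizing seen with
  | nil => simp [pvDLen]
  | cons x xs ih =>
    simp only [pvDLen, List.length_cons]
    split
    · omega
    · have := ih (x :: seen); omega

theorem pvDLen_congr (s t l : List Int) (h : ∀ a, a ∈ s ↔ a ∈ t) :
    pvDLen s l = pvDLen t l := by
  induction l generalizing s t with
  | nil => rfl
  | cons x xs ih =>
    simp only [pvDLen]
    by_cases hx : x ∈ s
    · rw [if_pos hx, if_pos ((h x).mp hx)]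
    · rw [if_neg hx, if_neg (fun hc => hx ((h x).mpr hc))]
      have := ih (x :: s) (x :: t) (by intro a; simp [h a])
      omega

theorem pvIdx_cons (x y : Int) (ys : List Int) :
    pvIdx x (y :: ys) = if y = x then 0 else pvIdx x ys + 1 := by
  simp only [pvIdx, List.findIdx_cons, Bool.cond_eq_ite, beq_iff_eq]

theorem pvIdx_lt_of_mem (x : Int) (l : List Int) (h : x ∈ l) : pvIdx x l < l.length := by
  induction l with
  | nil => simp at h
  | cons y ys ih =>
    rw [pvIdx_cons]
    by_cases hyx : y = x
    · simp [hyx]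
    · have hx : x ∈ ys := by
        rcases List.mem_cons.mp h with h1 | h1
        · exact absurd h1.symm hyx
        · exact h1
      rw [if_neg hyx]
      simpa [List.length_cons] using Nat.succ_lt_succ (ih hx)

theorem pvIdx_of_not_mem (x : Int) (l : List Int) (h : x ∉ l) : pvIdx x l = l.length := by
  induction l with
  | nil => rfl
  | cons y ys ih =>
    rw [pvIdx_cons]
    have hy : y ≠ x := by intro he; exact h (by simp [he])
    rw [if_neg hy, ih (fun hm => h (List.mem_cons_of_mem _ hm))]
    simp

theorem pvDLen_cons_seen (x : Int) (seen l : List Int) :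
    pvDLen (x :: seen) l = min (pvIdx x l) (pvDLen seen l) := by
  induction l generalizing seen with
  | nil => simp [pvDLen, pvIdx]
  | cons y ys ih =>
    rw [pvIdx_cons]
    by_cases hyx : y = x
    · subst hyx; simp [pvDLen]
    · simp only [pvDLen, List.mem_cons]
      by_cases hys : y ∈ seen
      · simp [hys, hyx]
      · rw [if_neg (by tauto), if_neg hys, if_neg hyx]
        have h1 : pvDLen (y :: x :: seen) ys = pvDLen (x :: y :: seen) ys :=
          pvDLen_congr _ _ _ (by intro a; simp; tauto)
        rw [h1, ih (y :: seen)]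
        omega

theorem pvDLen_cons_nil (x : Int) (r : List Int) :
    pvDLen [] (x :: r) = 1 + min (pvIdx x r) (pvDLen [] r) := by
  simp [pvDLen, pvDLen_cons_seen]

theorem pvDLen_cons_nil_pos (x : Int) (r : List Int) : 1 ≤ pvDLen [] (x :: r) := by
  rw [pvDLen_cons_nil]; omega

theorem pvG_nonneg (r l : List Int) : 0 ≤ pvG r l := by
  induction l generalizing r with
  | nil => simp [pvG]
  | cons x xs ih => simp only [pvG]; have := ih (x :: r); positivity

theorem pvG_cons_pos (r : List Int) (x : Int) (xs : List Int) : 1 ≤ pvG r (x :: xs) := by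
  simp only [pvG]
  have h1 := pvDLen_cons_nil_pos x r
  have h2 := pvG_nonneg (x :: r) xs
  omega

theorem pvG_snoc (r l : List Int) (x : Int) :
    pvG r (l ++ [x]) = pvG r l + (pvDLen [] (x :: (l.reverse ++ r)) : Int) := by
  induction l generalizing r with
  | nil => simp [pvG]
  | cons y ys ih =>
    simp only [List.cons_append, pvG, List.reverse_cons, List.append_assoc]
    rw [ih (y :: r)]
    simp; ring

-- ===== B-side: the backward scan computes the distinct-suffix length =====

theorem pvBScan_eq (songs : List Int) : ∀ (k : Nat), k ≤ songs.length → ∀ (seen : PySem.Set Int),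
    pvBScan songs seen k = (k : Int) - 1 - (pvDLen seen ((songs.take k).reverse) : Int) := by
  intro k
  induction k with
  | zero => intro _ seen; simp [pvBScan, pvDLen]
  | succ k ih =>
    intro hk seen
    have hklt : k < songs.length := by omega
    have hx : PySem.List.pyGetD songs ((k : Nat) : Int) 0 = songs[k] := by
      rw [PySem.List.pyGetD_natCast]
      simp [List.getD, List.getElem?_eq_getElem hklt]
    have htake : (songs.take (k + 1)).reverse = songs[k] :: (songs.take k).reverse := by
      rw [List.take_add_one]
      simp [List.getElem?_eq_getElem hklt]
    simp only [pvBScan, Int.ofNat_eq_natCast, hx, htake]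
    by_cases hmem : songs[k] ∈ seen
    · rw [if_pos (by simpa [PySem.Set.contains] using hmem)]
      simp only [pvDLen, if_pos hmem]
      push_cast; omega
    · rw [if_neg (by simpa [PySem.Set.contains] using hmem)]
      have hadd : PySem.Set.add seen songs[k] = seen ++ [songs[k]] := by
        simp [PySem.Set.add, PySem.Set.contains]
        intro h; exact absurd h hmem
      rw [hadd, ih (by omega) (seen ++ [songs[k]])]
      have hcongr : pvDLen (seen ++ [songs[k]]) (songs.take k).reverse
          = pvDLen (songs[k] :: seen) (songs.take k).reverse :=
        pvDLen_congr _ _ _ (by intro a; simp; tauto)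
      rw [hcongr]
      simp only [pvDLen, if_neg hmem]
      push_cast; omega

theorem count_parts_alt_eq (songs : List Int) : count_parts_alt songs = pvG [] songs := by
  have main : ∀ (m : Nat), m ≤ songs.length →
      (List.range m).foldl
        (fun total i => total + ((Int.ofNat i) - pvBScan songs PySem.Set.empty (i + 1))) 0
      = pvG [] (songs.take m) := by
    intro m
    induction m with
    | zero => intro _; simp [pvG]
    | succ m ih =>
      intro hm
      have hmlt : m < songs.length := by omega
      rw [List.range_succ, List.foldl_append, ih (by omega)]
      simp only [List.foldl_cons, List.foldl_nil, Int.ofNat_eq_natCast]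
      rw [pvBScan_eq songs (m + 1) (by omega) PySem.Set.empty]
      have htake : songs.take (m + 1) = songs.take m ++ [songs[m]] := by
        rw [List.take_add_one]; simp [List.getElem?_eq_getElem hmlt]
      rw [htake, pvG_snoc]
      have : ((songs.take m).reverse ++ [] : List Int) = (songs.take m).reverse := by simp
      rw [this]
      have : PySem.Set.empty = ([] : List Int) := rfl
      rw [this]
      simp only [List.reverse_append, List.reverse_cons, List.reverse_nil, List.nil_append,
        List.singleton_append]
      push_cast; omega
  have := main songs.length (le_refl _)
  rw [List.take_length] at this
  simpa [count_parts_alt] using this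

-- ===== A-side: the dict/max-start loop computes the same sum =====

theorem pvALoop_eq (l : List Int) : ∀ (r : List Int) (pos : PySem.Dict Int Int) (count : Int),
    (∀ x, pos.get? x = if x ∈ r then some ((r.length : Int) - 1 - (pvIdx x r : Int)) else none) →
    pvALoop l (r.length : Int) pos ((r.length : Int) - (pvDLen [] r : Int)) count
      = count + pvG r l := by
  induction l with
  | nil => intro r pos count _; simp [pvALoop, pvG]
  | cons x xs ih =>
    intro r pos count hpos
    have hdle : pvDLen [] r ≤ r.length := pvDLen_le [] r
    have hxr : (pvDLen [] (x :: r) : Int) = 1 + min ((pvIdx x r : Int)) ((pvDLen [] r : Int)) := by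
      rw [pvDLen_cons_nil]; push_cast; ring
    have hpos' : ∀ y, (pos.insert x (r.length : Int)).get? y
        = if y ∈ x :: r then some (((x :: r).length : Int) - 1 - (pvIdx y (x :: r) : Int)) else none := by
      intro y
      rw [PySem.Dict.get?_insert]
      by_cases hyx : y = x
      · subst hyx
        rw [if_pos rfl, if_pos (List.mem_cons_self), pvIdx_cons, if_pos rfl]
        simp
      · rw [if_neg hyx, hpos y]
        by_cases hyr : y ∈ r
        · rw [if_pos hyr, if_pos (show y ∈ x :: r by simp [hyr])]
          rw [pvIdx_cons, if_neg (fun h : x = y => hyx h.symm)]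
          simp only [List.length_cons, Option.some.injEq]
          push_cast; ring
        · rw [if_neg hyr, if_neg (by simp [hyx, hyr])]
    have hrec := ih (x :: r) (pos.insert x (r.length : Int)) (count + (pvDLen [] (x :: r) : Int)) hpos'
    simp only [List.length_cons] at hrec
    by_cases hmem : x ∈ r
    · have hget : pos.get? x = some ((r.length : Int) - 1 - (pvIdx x r : Int)) := by
        rw [hpos x, if_pos hmem]
      have hidx := pvIdx_lt_of_mem x r hmem
      simp only [pvALoop, hget]
      have hs : max ((r.length : Int) - (pvDLen [] r : Int)) (((r.length : Int) - 1 - (pvIdx x r : Int)) + 1)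
          = ((r.length : Int) + 1) - (pvDLen [] (x :: r) : Int) := by
        rw [hxr]; omega
      rw [hs]
      have hlen : (r.length : Int) - (((r.length : Int) + 1) - (pvDLen [] (x :: r) : Int)) + 1
          = (pvDLen [] (x :: r) : Int) := by ring
      rw [hlen]
      push_cast at hrec ⊢
      rw [hrec]
      simp only [pvG]; ring
    · have hget : pos.get? x = none := by rw [hpos x, if_neg hmem]
      simp only [pvALoop, hget]
      have hs : (r.length : Int) - (pvDLen [] r : Int)
          = ((r.length : Int) + 1) - (pvDLen [] (x :: r) : Int) := by
        rw [hxr, pvIdx_of_not_mem x r hmem]; omega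
      rw [hs]
      have hlen : (r.length : Int) - (((r.length : Int) + 1) - (pvDLen [] (x :: r) : Int)) + 1
          = (pvDLen [] (x :: r) : Int) := by ring
      rw [hlen]
      push_cast at hrec ⊢
      rw [hrec]
      simp only [pvG]; ring

theorem count_parts_eq (songs : List Int) : count_parts songs = pvG [] songs := by
  have hloop : pvALoop songs 0 PySem.Dict.empty 0 0 = pvG [] songs := by
    have h := pvALoop_eq songs [] PySem.Dict.empty 0
      (by intro x; simp [PySem.Dict.get?_empty])
    simpa [pvDLen] using h
  unfold count_parts
  simp only [hloop]
  cases songs with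
  | nil => simp [pvG, PySem.Int.floordiv]
  | cons x xs =>
    have hpos := pvG_cons_pos [] x xs
    rw [if_neg (by have := pvG_cons_pos [] x xs; simp only [beq_iff_eq]; omega)]

-- ===== VERDICT (by name: the statement is the Claim_ definition above) =====
theorem count_parts_spec : Claim_equal_count_parts := by
  intro songs _
  unfold Spec_count_parts
  rw [count_parts_eq, count_parts_alt_eq]
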